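-- pv_equiv track=rewrite | github.com/Sonu83497/Learn-Python | modules/cal.py | product_of_digits_in_range
-- ===== SOURCE A (Python) =====
-- def product_of_digits_in_range(start, end):
--     product = 1
--     for num in range(start, end + 1):
--         n = num
--         while n > 0:
--             product *= n % 10
--             n //= 10
--     return product
-- ===== SOURCE B (Python) =====
-- def product_of_digits_in_range(start, end):
--     product = 1
--     for num in range(start, end + 1):
--         if num > 0:
--             for d in str(num):
--                 product *= int(d)
--     return product
-- ===== Notes on version B (the rewrite author's own statement) =====
-- stated objective: idiomatic
-- what changed: The arithmetic digit-peeling while-loop (n % 10, n //= 10) is replaced by iterating over the decimal string str(num), converting each character back with int(d); a guard num > 0 keeps the exact skipping of zero and negative numbers.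
import Mathlib
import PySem

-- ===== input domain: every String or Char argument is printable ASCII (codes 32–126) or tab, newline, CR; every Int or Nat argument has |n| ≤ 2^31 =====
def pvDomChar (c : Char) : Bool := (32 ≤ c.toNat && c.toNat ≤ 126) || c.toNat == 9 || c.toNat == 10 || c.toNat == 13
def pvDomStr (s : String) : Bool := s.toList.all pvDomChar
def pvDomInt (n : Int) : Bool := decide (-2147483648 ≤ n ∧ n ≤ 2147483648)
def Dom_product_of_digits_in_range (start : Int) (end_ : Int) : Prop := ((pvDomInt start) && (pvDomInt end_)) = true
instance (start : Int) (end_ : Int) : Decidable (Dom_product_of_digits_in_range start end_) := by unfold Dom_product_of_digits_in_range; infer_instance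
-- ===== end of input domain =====

-- B replaces A's arithmetic digit-peeling while-loop by iterating over the characters of str(num)
-- (guarded by num > 0, which matches A's skipping of zero and negatives); objective: idiomatic.

-- ===== PORT A =====
-- inner 'while n > 0: product *= n % 10; n //= 10' of A
def pyWhileA (n : Int) (product : Int) : Int :=
  if 0 < n then pyWhileA (PySem.Int.floordiv n 10) (product * PySem.Int.mod n 10)
  else product
termination_by n.toNat
decreasing_by
  rw [PySem.Int.floordiv_eq_ediv_of_pos (by norm_num : (0:Int) < 10)]; omega

def product_of_digits_in_range (start : Int) (end_ : Int) : Int :=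
  List.foldl (fun product num => pyWhileA num product) 1
    (PySem.List.pyRange start (end_ + 1))

-- ===== PORT B =====
-- int(d) for a single character d (always a decimal digit where B uses it)
def pyDigitInt (c : Char) : Int := (PySem.Int.ofStr? (String.ofList [c])).getD 0

def product_of_digits_in_range_alt (start : Int) (end_ : Int) : Int :=
  List.foldl
    (fun product num =>
      if 0 < num then
        List.foldl (fun p d => p * pyDigitInt d) product (PySem.Int.toStr num).toList
      else product)
    1 (PySem.List.pyRange start (end_ + 1))

-- ===== PRECONDITION & SPEC =====
def Spec_product_of_digits_in_range (start : Int) (end_ : Int) (out : Int) : Prop := out = product_of_digits_in_range_alt start end_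
instance (start : Int) (end_ : Int) (out : Int) : Decidable (Spec_product_of_digits_in_range start end_ out) := by unfold Spec_product_of_digits_in_range; infer_instance

-- ===== CLAIM (what is proved, stated in full; the proofs are below) =====
def Claim_equal_product_of_digits_in_range : Prop := ∀ (start : Int) (end_ : Int), Dom_product_of_digits_in_range start end_ → Spec_product_of_digits_in_range start end_ (product_of_digits_in_range start end_)

-- ===== LEMMAS AND PROOFS =====

-- digit product of a natural number (proof-side characterisation of both inner loops)
def digProd (m : Nat) : Int :=
  if m = 0 then 1 else digProd (m / 10) * ((m % 10 : Nat) : Int)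
termination_by m
decreasing_by omega

lemma pyWhileA_natCast (m : Nat) : ∀ p : Int, pyWhileA (m : Int) p = p * digProd m := by
  induction m using Nat.strong_induction_on with
  | _ m ih =>
    intro p
    rw [pyWhileA]
    by_cases h : m = 0
    · subst h; simp [digProd]
    · have hpos : (0:Int) < (m : Int) := by exact_mod_cast Nat.pos_of_ne_zero h
      have hdiv : PySem.Int.floordiv ((m : Nat) : Int) 10 = ((m / 10 : Nat) : Int) := by
        exact_mod_cast PySem.Int.floordiv_natCast m 10
      have hmod : PySem.Int.mod ((m : Nat) : Int) 10 = ((m % 10 : Nat) : Int) := by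
        exact_mod_cast PySem.Int.mod_natCast m 10
      rw [if_pos hpos, hdiv, hmod, ih (m / 10) (by omega)]
      rw [show digProd m = digProd (m / 10) * ((m % 10 : Nat) : Int) by rw [digProd]; simp [h]]
      ring

lemma pyDigitInt_digitChar (r : Nat) (h : r < 10) :
    pyDigitInt (Nat.digitChar r) = (r : Int) := by
  interval_cases r <;> decide

lemma toDigitsCore_succ_eq (f m : Nat) (acc : List Char) :
    Nat.toDigitsCore 10 (f+1) m acc =
      if m / 10 = 0 then (m % 10).digitChar :: acc
      else Nat.toDigitsCore 10 f (m / 10) ((m % 10).digitChar :: acc) := rfl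

lemma foldl_toDigitsCore (f : Nat) : ∀ (m : Nat) (acc : List Char) (p : Int), m < f →
    List.foldl (fun p d => p * pyDigitInt d) p (Nat.toDigitsCore 10 f m acc)
      = List.foldl (fun p d => p * pyDigitInt d)
          (p * (if m = 0 then 0 else digProd m)) acc := by
  induction f with
  | zero => intro m acc p h; omega
  | succ f ih =>
    intro m acc p h
    rw [toDigitsCore_succ_eq]
    have hmod : m % 10 < 10 := Nat.mod_lt _ (by norm_num)
    by_cases h0 : m / 10 = 0
    · rw [if_pos h0]
      simp only [List.foldl_cons, pyDigitInt_digitChar (m % 10) hmod]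
      congr 1
      by_cases hm : m = 0
      · subst hm; simp
      · rw [if_neg hm, show digProd m = digProd (m / 10) * ((m % 10 : Nat) : Int) by
          rw [digProd]; simp [hm], h0]
        simp [digProd]
    · rw [if_neg h0]
      have hm : m ≠ 0 := by omega
      rw [ih (m / 10) _ p (by omega)]
      simp only [List.foldl_cons, pyDigitInt_digitChar (m % 10) hmod, if_neg h0]
      congr 1
      rw [if_neg hm, show digProd m = digProd (m / 10) * ((m % 10 : Nat) : Int) by
        rw [digProd]; simp [hm]]
      ring

lemma foldl_toChars_natCast (m : Nat) (hm : m ≠ 0) (p : Int) :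
    List.foldl (fun p d => p * pyDigitInt d) p (PySem.Int.toChars (m : Int)) = p * digProd m := by
  have hneg : ¬ ((m : Int) < 0) := by omega
  simp only [PySem.Int.toChars, if_neg hneg, Int.toNat_natCast]
  rw [show Nat.toDigits 10 m = Nat.toDigitsCore 10 (m+1) m [] from rfl]
  rw [foldl_toDigitsCore (m+1) m [] p (by omega)]
  simp [hm]

lemma step_eq (product num : Int) :
    (if 0 < num then
        List.foldl (fun p d => p * pyDigitInt d) product (PySem.Int.toStr num).toList
      else product) = pyWhileA num product := by
  by_cases h : 0 < num
  · obtain ⟨m, rfl⟩ : ∃ m : Nat, num = (m : Int) := ⟨num.toNat, by omega⟩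
    have hm : m ≠ 0 := by
      intro hc; subst hc; simp at h
    rw [if_pos h, PySem.Int.toList_toStr, foldl_toChars_natCast m hm, pyWhileA_natCast]
  · rw [if_neg h, pyWhileA, if_neg h]

-- ===== VERDICT (by name: the statement is the Claim_ definition above) =====
theorem product_of_digits_in_range_spec : Claim_equal_product_of_digits_in_range := by
  intro start end_ _
  unfold Spec_product_of_digits_in_range product_of_digits_in_range product_of_digits_in_range_alt
  have hfun : (fun (product num : Int) =>
      if 0 < num then
        List.foldl (fun p d => p * pyDigitInt d) product (PySem.Int.toStr num).toList
      else product) = fun product num => pyWhileA num product := by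
    funext product num; exact step_eq product num
  rw [hfun]
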